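-- pv_equiv track=rewrite | github.com/Ham12-3/local-study-ai | studyvault/services/runtime_manager.py | _extract_percent
-- ===== SOURCE A (Python) =====
-- def _extract_percent(text: str) -> int | None:
--     marker = "%"
--     if marker not in text:
--         return None
--     before = text.split(marker, 1)[0]
--     digits = ""
--     for char in reversed(before):
--         if char.isdigit():
--             digits = char + digits
--         elif digits:
--             break
--     if not digits:
--         return None
--     return max(0, min(100, int(digits)))
-- ===== SOURCE B (Python) =====
-- def _extract_percent(text: str) -> int | None:
--     last = ""
--     cur = ""
--     for ch in text:
--         if ch == "%":
--             run = cur if cur else last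
--             return max(0, min(100, int(run))) if run else None
--         if ch.isdigit():
--             cur += ch
--         else:
--             if cur:
--                 last = cur
--             cur = ""
--     return None
-- ===== Notes on version B (the rewrite author's own statement) =====
-- stated objective: alternative
-- what changed: Replaced A's split-at-percent followed by a backward character scan with break logic by a single forward pass over the whole text that maintains the current and last completed digit run and returns at the first percent sign.
import Mathlib
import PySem

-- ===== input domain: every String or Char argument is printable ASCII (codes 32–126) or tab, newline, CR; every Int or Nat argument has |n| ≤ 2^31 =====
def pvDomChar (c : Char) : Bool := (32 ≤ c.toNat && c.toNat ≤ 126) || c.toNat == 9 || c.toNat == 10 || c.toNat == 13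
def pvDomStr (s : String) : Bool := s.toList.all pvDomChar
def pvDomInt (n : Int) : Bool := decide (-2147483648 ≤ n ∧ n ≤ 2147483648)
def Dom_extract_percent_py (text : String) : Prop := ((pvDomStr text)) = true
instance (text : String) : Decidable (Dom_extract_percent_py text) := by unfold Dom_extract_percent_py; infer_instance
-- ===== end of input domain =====

-- B replaces A's split-then-backward-scan by a single forward pass over the whole text that
-- tracks the current and last completed digit run and returns at the first '%' — objective: alternative.


-- ===== PORT A =====
-- A's backward loop over `reversed(before)` with accumulator `digits` and the `break`:
-- structural recursion, early return on the break.
def pvLoopA (l : List Char) (digits : List Char) : List Char :=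
  match l with
  | [] => digits
  | c :: rest =>
    if PySem.Chars.isdigit c then pvLoopA rest (c :: digits)
    else if digits.isEmpty then pvLoopA rest digits
    else digits

def extract_percent_py (text : String) : Option Int :=
  if PySem.Str.isIn "%" text = false then none      -- if marker not in text: return None
  else
    -- before = text.split(marker, 1)[0]  (sep nonempty → splitMax? is some; [0] always exists)
    let before := ((PySem.Chars.splitMax? text.toList "%".toList 1).getD []).headD []
    let digits := pvLoopA before.reverse []
    if digits.isEmpty then none
    -- int(digits): digits is a nonempty all-digit string, so ofChars? is some; getD 0 never fires
    else some (max 0 (min 100 ((PySem.Int.ofChars? digits).getD 0)))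

-- ===== PORT B =====
-- B's single forward loop over the text: `last` the most recent completed digit run,
-- `cur` the run in progress; the early `return` at the first '%' is the base answer case.
def pvScan (l : List Char) (last cur : List Char) : Option Int :=
  match l with
  | [] => none                                      -- loop ends without seeing '%': return None
  | c :: rest =>
    if c = '%' then
      let run := if cur.isEmpty then last else cur  -- run = cur if cur else last
      if run.isEmpty then none
      -- int(run): run is a nonempty all-digit string, so ofChars? is some; getD 0 never fires
      else some (max 0 (min 100 ((PySem.Int.ofChars? run).getD 0)))
    else if PySem.Chars.isdigit c then pvScan rest last (cur ++ [c])          -- cur += ch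
    else pvScan rest (if cur.isEmpty then last else cur) []                   -- close the run

def extract_percent_py_alt (text : String) : Option Int :=
  pvScan text.toList [] []

-- ===== PRECONDITION & SPEC =====
def Spec_extract_percent_py (text : String) (out : Option Int) : Prop := out = extract_percent_py_alt text
instance (text : String) (out : Option Int) : Decidable (Spec_extract_percent_py text out) := by unfold Spec_extract_percent_py; infer_instance

-- ===== CLAIM (what is proved, stated in full; the proofs are below) =====
def Claim_equal_extract_percent_py : Prop := ∀ (text : String), Dom_extract_percent_py text → Spec_extract_percent_py text (extract_percent_py text)

-- ===== LEMMAS AND PROOFS =====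

-- the common output shape: None for an empty run, else the clamped int value.
def pvOut (run : List Char) : Option Int :=
  if run.isEmpty then none
  else some (max 0 (min 100 ((PySem.Int.ofChars? run).getD 0)))

-- proof-side spec: the maximal digit runs of a list, in order.
def pvRuns (cs : List Char) : List (List Char) :=
  match cs with
  | [] => []
  | c :: rest =>
    if PySem.Chars.isdigit c then
      (c :: rest.takeWhile PySem.Chars.isdigit) :: pvRuns (rest.dropWhile PySem.Chars.isdigit)
    else pvRuns rest
termination_by cs.length
decreasing_by
  · simpa using Nat.lt_succ_of_le (List.length_dropWhile_le _ _)
  · simp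

-- a digit is not the percent sign.
theorem pv_digit_ne_percent (c : Char) (h : PySem.Chars.isdigit c = true) : c ≠ '%' := by
  intro rfl; simp [PySem.Chars.isdigit] at h

-- ---- A-side lemmas (the backward scan) ----

-- an all-digit list is consumed entirely.
theorem pvLoopA_all_digit (l : List Char) (acc : List Char)
    (h : ∀ c ∈ l, PySem.Chars.isdigit c) : pvLoopA l acc = l.reverse ++ acc := by
  induction l generalizing acc with
  | nil => simp [pvLoopA]
  | cons c rest ih =>
    have hc := h c (by simp)
    simp [pvLoopA, hc, ih (c :: acc) (fun x hx => h x (by simp [hx]))]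

-- skip phase: leading non-digits are dropped while the accumulator is empty.
theorem pvLoopA_skip (u l : List Char) (h : ∀ c ∈ u, ¬ PySem.Chars.isdigit c) :
    pvLoopA (u ++ l) [] = pvLoopA l [] := by
  induction u with
  | nil => rfl
  | cons c rest ih =>
    have hc := h c (by simp)
    simp [pvLoopA, hc, List.isEmpty_nil, ih (fun x hx => h x (by simp [hx]))]

-- the loop returns (by break or exhaustion) without looking past a block that ends in a
-- non-digit, provided a break is guaranteed (accumulator nonempty or a digit inside).
theorem pvLoopA_stops (xs : List Char) (c : Char) (w acc : List Char)
    (hc : ¬ PySem.Chars.isdigit c)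
    (hbr : acc ≠ [] ∨ ∃ d ∈ xs, PySem.Chars.isdigit d) :
    pvLoopA ((xs ++ [c]) ++ w) acc = pvLoopA (xs ++ [c]) acc := by
  induction xs generalizing acc with
  | nil =>
    rcases hbr with h | h
    · simp [pvLoopA, hc, List.isEmpty_iff, h]
    · simp at h
  | cons x rest ih =>
    by_cases hx : PySem.Chars.isdigit x
    · simpa [pvLoopA, hx] using ih (x :: acc) (Or.inl (by simp))
    · by_cases ha : acc = []
      · subst ha
        have : ∃ d ∈ rest, PySem.Chars.isdigit d := by
          rcases hbr with h | ⟨d, hd, hdig⟩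
          · exact absurd rfl h
          · rcases List.mem_cons.mp hd with rfl | hd
            · exact absurd hdig hx
            · exact ⟨d, hd, hdig⟩
        simpa [pvLoopA, hx, List.isEmpty_nil] using ih [] (Or.inr this)
      · simp [pvLoopA, hx, List.isEmpty_iff, ha]

-- a trailing non-digit never changes the result (the loop returns before or at it).
theorem pvLoopA_append_nondigit (l : List Char) (acc : List Char) (c : Char)
    (hc : ¬ PySem.Chars.isdigit c) : pvLoopA (l ++ [c]) acc = pvLoopA l acc := by
  induction l generalizing acc with
  | nil => cases acc <;> simp [pvLoopA, hc]
  | cons x xs ih =>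
    by_cases hx : PySem.Chars.isdigit x
    · simp [pvLoopA, hx, ih]
    · cases acc <;> simp [pvLoopA, hx, ih]

-- ---- pvRuns lemmas ----

-- unfolding lemma for pvRuns on a cons.
theorem pvRuns_cons (c : Char) (rest : List Char) :
    pvRuns (c :: rest) =
      if PySem.Chars.isdigit c then
        (c :: rest.takeWhile PySem.Chars.isdigit) :: pvRuns (rest.dropWhile PySem.Chars.isdigit)
      else pvRuns rest := by
  rw [pvRuns.eq_def]

-- pvRuns on the empty list.
theorem pvRuns_nil : pvRuns [] = [] := by rw [pvRuns.eq_def]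

-- pvRuns is empty exactly when the list has no digit.
theorem pvRuns_eq_nil_iff (u : List Char) :
    pvRuns u = [] ↔ ∀ x ∈ u, ¬ PySem.Chars.isdigit x := by
  induction u with
  | nil => simp [pvRuns_nil]
  | cons y ys ih =>
    rw [pvRuns_cons]
    by_cases hy : PySem.Chars.isdigit y
    · simp [hy]
    · simp [hy, ih]

-- KEY A-LEMMA: A's backward scan computes the last maximal digit run.
theorem pvLoopA_eq_lastRun (cs : List Char) :
    pvLoopA cs.reverse [] = (pvRuns cs).getLastD [] := by
  fun_induction pvRuns cs with
  | case1 => simp [pvLoopA]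
  | case2 c rest hc ih =>
    have hrest : rest = rest.takeWhile PySem.Chars.isdigit ++ rest.dropWhile PySem.Chars.isdigit :=
      (List.takeWhile_append_dropWhile).symm
    have htd : ∀ x ∈ rest.takeWhile PySem.Chars.isdigit, PySem.Chars.isdigit x :=
      fun x hx => List.mem_takeWhile_imp hx
    by_cases hru : pvRuns (rest.dropWhile PySem.Chars.isdigit) = []
    · -- no digit after the leading run: the loop skips the (all non-digit) tail,
      -- then consumes the run and c
      have hund := (pvRuns_eq_nil_iff _).mp hru
      calc pvLoopA (c :: rest).reverse []
          = pvLoopA ((rest.dropWhile PySem.Chars.isdigit).reverse ++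
              ((rest.takeWhile PySem.Chars.isdigit).reverse ++ [c])) [] := by
            congr 1
            conv_lhs => rw [hrest]
            simp only [List.reverse_cons, List.reverse_append, List.append_assoc]
        _ = pvLoopA ((rest.takeWhile PySem.Chars.isdigit).reverse ++ [c]) [] :=
            pvLoopA_skip _ _ (fun x hx => hund x (List.mem_reverse.mp hx))
        _ = c :: rest.takeWhile PySem.Chars.isdigit := by
            rw [pvLoopA_all_digit]
            · simp
            · intro x hx
              rcases List.mem_append.mp hx with hx' | hx'
              · exact htd x (List.mem_reverse.mp hx')
              · simp at hx'; subst hx'; exact hc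
        _ = ((c :: rest.takeWhile PySem.Chars.isdigit) :: pvRuns
              (rest.dropWhile PySem.Chars.isdigit)).getLastD [] := by
            rw [hru]; simp
    · -- a later run exists: the loop breaks inside the reversed tail and never reaches c
      have hune : rest.dropWhile PySem.Chars.isdigit ≠ [] := by
        intro h; rw [h, pvRuns_nil] at hru; exact hru rfl
      rcases List.exists_cons_of_ne_nil hune with ⟨y, ys, hyu⟩
      have hynd : ¬ PySem.Chars.isdigit y := by
        have h := List.head_dropWhile_not (p := PySem.Chars.isdigit) (l := rest) hune
        simp only [hyu, List.head_cons] at h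
        simp [h]
      have hudig : ∃ d ∈ rest.dropWhile PySem.Chars.isdigit, PySem.Chars.isdigit d := by
        by_contra hno
        rw [not_exists] at hno
        simp only [not_and] at hno
        exact hru ((pvRuns_eq_nil_iff _).mpr (by simpa using hno))
      have hgl : ((c :: rest.takeWhile PySem.Chars.isdigit) :: pvRuns
            (rest.dropWhile PySem.Chars.isdigit)).getLastD [] =
          (pvRuns (rest.dropWhile PySem.Chars.isdigit)).getLastD [] := by
        rcases List.exists_cons_of_ne_nil hru with ⟨r, rs, hrr⟩
        rw [hrr]
        simp [List.getLastD]
      calc pvLoopA (c :: rest).reverse []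
          = pvLoopA ((ys.reverse ++ [y]) ++
              ((rest.takeWhile PySem.Chars.isdigit).reverse ++ [c])) [] := by
            congr 1
            conv_lhs => rw [hrest, hyu]
            simp only [List.reverse_cons, List.reverse_append, List.append_assoc]
        _ = pvLoopA (ys.reverse ++ [y]) [] := by
            apply pvLoopA_stops _ _ _ _ hynd
            right
            rcases hudig with ⟨d, hd, hdd⟩
            rw [hyu] at hd
            rcases List.mem_cons.mp hd with rfl | hd'
            · exact absurd hdd hynd
            · exact ⟨d, by simp [hd'], hdd⟩
        _ = pvLoopA (rest.dropWhile PySem.Chars.isdigit).reverse [] := by rw [hyu]; simp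
        _ = (pvRuns (rest.dropWhile PySem.Chars.isdigit)).getLastD [] := ih
        _ = _ := hgl.symm
  | case3 c rest hc ih =>
    rw [← ih]
    have h : (c :: rest).reverse = rest.reverse ++ [c] := by simp
    rw [h, pvLoopA_append_nondigit _ _ _ hc]

-- ---- B-side lemmas (the forward scan) ----

-- without a '%' the scan falls off the end and returns none.
theorem pvScan_no_percent (l : List Char) (h : '%' ∉ l) (last cur : List Char) :
    pvScan l last cur = none := by
  induction l generalizing last cur with
  | nil => rfl
  | cons c rest ih =>
    have hc : c ≠ '%' := fun hc => h (by simp [hc])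
    have hr : '%' ∉ rest := fun hr => h (by simp [hr])
    by_cases hd : PySem.Chars.isdigit c <;> simp [pvScan, hc, hd, ih hr]

-- the scan appends an all-digit block to the run in progress.
theorem pvScan_digits (ds : List Char) (h : ∀ c ∈ ds, PySem.Chars.isdigit c)
    (tail last cur : List Char) :
    pvScan (ds ++ tail) last cur = pvScan tail last (cur ++ ds) := by
  induction ds generalizing cur with
  | nil => simp
  | cons d ds' ih =>
    have hd := h d (by simp)
    have hne : d ≠ '%' := pv_digit_ne_percent d hd
    simp only [List.cons_append, pvScan, if_neg hne, if_pos hd]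
    rw [ih (fun x hx => h x (by simp [hx])) (cur ++ [d])]
    simp

-- KEY B-LEMMA: on a '%'-free prefix u the forward scan ends at the '%' with the last
-- maximal digit run of u (or the seeded `last` if u has none).
theorem pvScan_main (u : List Char) (hu : ∀ c ∈ u, c ≠ '%') (w : List Char) :
    ∀ last : List Char, pvScan (u ++ '%' :: w) last [] =
      pvOut (if pvRuns u = [] then last else (pvRuns u).getLastD []) := by
  fun_induction pvRuns u with
  | case1 => intro last; simp [pvScan, pvOut]
  | case2 c rest hc ih =>
    intro last
    have hcp : c ≠ '%' := pv_digit_ne_percent c hc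
    have htd : ∀ x ∈ rest.takeWhile PySem.Chars.isdigit, PySem.Chars.isdigit x :=
      fun x hx => List.mem_takeWhile_imp hx
    have hrest : rest = rest.takeWhile PySem.Chars.isdigit ++ rest.dropWhile PySem.Chars.isdigit :=
      (List.takeWhile_append_dropWhile).symm
    have hstep : pvScan ((c :: rest) ++ '%' :: w) last [] =
        pvScan (rest.dropWhile PySem.Chars.isdigit ++ '%' :: w) last
          (c :: rest.takeWhile PySem.Chars.isdigit) := by
      simp only [List.cons_append, pvScan, if_neg hcp, if_pos hc, List.nil_append]
      conv_lhs => rw [hrest]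
      rw [List.append_assoc, pvScan_digits _ htd]
      simp
    rw [hstep]
    cases hdw : rest.dropWhile PySem.Chars.isdigit with
    | nil =>
      simp only [List.nil_append, pvScan, pvRuns_nil]
      simp [pvOut, List.getLastD]
    | cons y ys =>
      have hynd : ¬ PySem.Chars.isdigit y := by
        have h := List.head_dropWhile_not (p := PySem.Chars.isdigit)
          (l := rest) (by rw [hdw]; simp)
        simp only [hdw, List.head_cons] at h
        simp [h]
      have hsub : ∀ x ∈ rest.dropWhile PySem.Chars.isdigit, x ≠ '%' := by
        intro x hx
        apply hu x
        rw [List.mem_cons]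
        right
        rw [hrest, List.mem_append]
        right; exact hx
      have hyp : y ≠ '%' := hsub y (by rw [hdw]; simp)
      -- one non-digit step: `cur` (the run) moves into `last`
      have h1 : pvScan ((y :: ys) ++ '%' :: w) last (c :: rest.takeWhile PySem.Chars.isdigit) =
          pvScan (ys ++ '%' :: w) (c :: rest.takeWhile PySem.Chars.isdigit) [] := by
        simp [pvScan, hyp, hynd]
      -- the same step out of the induction hypothesis's shape
      have h2 : pvScan ((y :: ys) ++ '%' :: w) (c :: rest.takeWhile PySem.Chars.isdigit) [] =
          pvScan (ys ++ '%' :: w) (c :: rest.takeWhile PySem.Chars.isdigit) [] := by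
        simp [pvScan, hyp, hynd]
      have hih := ih hsub (c :: rest.takeWhile PySem.Chars.isdigit)
      rw [hdw] at hih
      rw [h1, ← h2, hih]
      by_cases hr0 : pvRuns (y :: ys) = []
      · simp [hr0, List.getLastD]
      · rcases List.exists_cons_of_ne_nil hr0 with ⟨r, rs, hrr⟩
        simp [hrr, List.getLastD]
  | case3 c rest hc ih =>
    intro last
    have hcp : c ≠ '%' := hu c (by simp)
    have hstep : pvScan ((c :: rest) ++ '%' :: w) last [] =
        pvScan (rest ++ '%' :: w) last [] := by
      simp [pvScan, hcp, hc]
    rw [hstep, ih (fun x hx => hu x (by simp [hx])) last]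

-- ---- splitting lemmas for A's `text.split("%", 1)[0]` ----

-- once the split budget is exhausted the rest is one piece, whatever the fuel.
theorem pv_go_m0 (fuel : Nat) (w : List Char) (acc : List (List Char)) :
    PySem.Chars.splitOnMax.go ['%'] fuel 0 w [] acc = acc.reverse ++ [w] := by
  cases fuel with
  | zero => simp [PySem.Chars.splitOnMax.go]
  | succ f => cases w <;> simp [PySem.Chars.splitOnMax.go]

-- split with maxsplit 1 at the first '%': two pieces, the '%'-free prefix and the rest.
theorem pv_go_split (u : List Char) (hu : ∀ c ∈ u, c ≠ '%') (w cur : List Char)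
    (acc : List (List Char)) (fuel : Nat) (hf : u.length + 1 ≤ fuel) :
    PySem.Chars.splitOnMax.go ['%'] fuel 1 (u ++ '%' :: w) cur acc =
      acc.reverse ++ [cur.reverse ++ u, w] := by
  induction u generalizing fuel cur acc with
  | nil =>
    cases fuel with
    | zero => omega
    | succ f =>
      simp [PySem.Chars.splitOnMax.go, List.isPrefixOf, pv_go_m0]
  | cons c u' ih =>
    cases fuel with
    | zero => simp at hf
    | succ f =>
      have hc : c ≠ '%' := hu c (by simp)
      simp only [List.cons_append, PySem.Chars.splitOnMax.go]
      rw [if_neg (by omega), if_neg (by simp [List.isPrefixOf]; exact fun h => (hc h.symm).elim)]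
      rw [ih (fun x hx => hu x (by simp [hx])) (c :: cur) acc f (by simp at hf ⊢; omega)]
      simp

-- decomposition of a list at its first '%'.
theorem pv_first_percent (s : List Char) (h : '%' ∈ s) :
    s = s.takeWhile (· ≠ '%') ++ '%' :: (s.dropWhile (· ≠ '%')).tail ∧
      (∀ c ∈ s.takeWhile (· ≠ '%'), c ≠ '%') := by
  have hd : s.dropWhile (· ≠ '%') ≠ [] := by
    intro hnil
    have := List.takeWhile_append_dropWhile (p := fun c => decide (c ≠ '%')) (l := s)
    rw [hnil, List.append_nil] at this
    rw [← this] at h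
    have := List.mem_takeWhile_imp h
    simp at this
  constructor
  · have hh : (s.dropWhile (· ≠ '%')).head hd = '%' := by
      have := List.head_dropWhile_not (p := fun c => decide (c ≠ '%')) hd
      simpa using this
    conv_lhs => rw [← List.takeWhile_append_dropWhile (p := fun c => decide (c ≠ '%')) (l := s)]
    rw [← List.cons_head_tail hd, hh]
    simp
  · intro c hc
    have := List.mem_takeWhile_imp hc
    simpa using this

-- ===== VERDICT (by name: the statement is the Claim_ definition above) =====
theorem extract_percent_py_spec : Claim_equal_extract_percent_py := by
  intro text _
  unfold Spec_extract_percent_py extract_percent_py extract_percent_py_alt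
  by_cases h : PySem.Str.isIn "%" text = false
  · rw [if_pos h]
    have hmem : '%' ∉ text.toList := by
      intro hm
      rcases List.append_of_mem hm with ⟨s, t, hst⟩
      have hinf : ("%".toList) <:+: text.toList := ⟨s, t, by simpa using hst.symm⟩
      have := (PySem.Chars.isIn_eq_false_iff _ _).mp (by rw [← PySem.Str.isIn_eq]; exact h)
      exact this hinf
    rw [pvScan_no_percent _ hmem]
  · rw [if_neg h]
    show (let before := ((PySem.Chars.splitMax? text.toList "%".toList 1).getD []).headD [];
          let digits := pvLoopA before.reverse [];
          if digits.isEmpty then none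
          else some (max 0 (min 100 ((PySem.Int.ofChars? digits).getD 0)))) =
         pvScan text.toList [] []
    have hmem : '%' ∈ text.toList := by
      have hin : PySem.Chars.isIn "%".toList text.toList = true := by
        rw [← PySem.Str.isIn_eq]
        cases hx : PySem.Str.isIn "%" text
        · exact absurd hx h
        · rfl
      rcases (PySem.Chars.isIn_iff_infix _ _).mp hin with ⟨s, t, hst⟩
      rw [← hst]
      simp
    obtain ⟨hdec, hfree⟩ := pv_first_percent text.toList hmem
    generalize hu : text.toList.takeWhile (· ≠ '%') = u at hdec hfree
    generalize hw : (text.toList.dropWhile (· ≠ '%')).tail = w at hdec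
    -- the forward scan of the whole text ends with the last digit run of u
    have hB : pvScan text.toList [] [] = pvOut ((pvRuns u).getLastD []) := by
      conv_lhs => rw [hdec]
      rw [pvScan_main u hfree w []]
      by_cases hr : pvRuns u = []
      · simp [hr]
      · rw [if_neg hr]
    -- the split: before = u
    have hsplit : ((PySem.Chars.splitMax? text.toList "%".toList 1).getD []).headD [] = u := by
      rw [PySem.Chars.splitMax?]
      rw [if_neg (by simp)]
      rw [PySem.Chars.splitOnMax]
      rw [if_neg (by omega)]
      rw [hdec]
      rw [show ("%".toList) = ['%'] from rfl, show ((1 : Int).toNat) = 1 from rfl]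
      rw [pv_go_split u hfree w [] [] _
        (by simp only [List.length_append, List.length_cons]; omega)]
      simp
    rw [hB]
    show (if (pvLoopA (((PySem.Chars.splitMax? text.toList "%".toList 1).getD []).headD []).reverse []).isEmpty
            then none
          else some (max 0 (min 100 ((PySem.Int.ofChars?
            (pvLoopA (((PySem.Chars.splitMax? text.toList "%".toList 1).getD []).headD []).reverse [])).getD 0)))) =
         pvOut ((pvRuns u).getLastD [])
    rw [hsplit, pvLoopA_eq_lastRun u]
    rfl
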